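-- pv_equiv track=rewrite | github.com/appcoreopc/competetive-programming-solutions | _miscellaneous/prime-generator/main.py | extend_basis
-- ===== SOURCE A (Python) =====
-- def extend_basis(UpperBoundNumber, nMax, basis, basic_basis, wheel_prime_numbers):
--     i = 1
--     while (i * nMax + 1 <= UpperBoundNumber):
--         nextLine = range(i * nMax + 1, i * nMax + nMax + 1)
--         filteredOut = []
--
--         for j in range(1, len(nextLine) + 1):
--             if j in wheel_prime_numbers:
--                 filteredOut.append(i * nMax + j)
--
--         for j in range(2, len(nextLine) + 1):
--             if not j in basic_basis and not (i * nMax + j) in filteredOut: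
--                 filteredOut.append(i * nMax + j)
--
--         nextLine = [ x for x in nextLine if not x in filteredOut ]
--         basis = basis + nextLine
--         i = i + 1
--
--     return basis
-- ===== SOURCE B (Python) =====
-- def extend_basis(UpperBoundNumber, nMax, basis, basic_basis, wheel_prime_numbers):
--     rows = (UpperBoundNumber - 1) // nMax if nMax >= 1 else 0
--     if rows <= 0:
--         return basis
--     # Precompute once the offsets kept in every row (A recomputes them per row).
--     kept = [j for j in range(1, nMax + 1)
--             if j not in wheel_prime_numbers and (j == 1 or j in basic_basis)]
--     return basis + [i * nMax + j for i in range(1, rows + 1) for j in kept]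
-- ===== Notes on version B (the rewrite author's own statement) =====
-- stated objective: simpler
-- what changed: B computes the kept offsets once as a closed-form predicate and the row count as a closed-form floor division, then emits all rows as one flat comprehension of arithmetic shifts, removing A's per-row filteredOut list and its repeated membership rescans.
import Mathlib
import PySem

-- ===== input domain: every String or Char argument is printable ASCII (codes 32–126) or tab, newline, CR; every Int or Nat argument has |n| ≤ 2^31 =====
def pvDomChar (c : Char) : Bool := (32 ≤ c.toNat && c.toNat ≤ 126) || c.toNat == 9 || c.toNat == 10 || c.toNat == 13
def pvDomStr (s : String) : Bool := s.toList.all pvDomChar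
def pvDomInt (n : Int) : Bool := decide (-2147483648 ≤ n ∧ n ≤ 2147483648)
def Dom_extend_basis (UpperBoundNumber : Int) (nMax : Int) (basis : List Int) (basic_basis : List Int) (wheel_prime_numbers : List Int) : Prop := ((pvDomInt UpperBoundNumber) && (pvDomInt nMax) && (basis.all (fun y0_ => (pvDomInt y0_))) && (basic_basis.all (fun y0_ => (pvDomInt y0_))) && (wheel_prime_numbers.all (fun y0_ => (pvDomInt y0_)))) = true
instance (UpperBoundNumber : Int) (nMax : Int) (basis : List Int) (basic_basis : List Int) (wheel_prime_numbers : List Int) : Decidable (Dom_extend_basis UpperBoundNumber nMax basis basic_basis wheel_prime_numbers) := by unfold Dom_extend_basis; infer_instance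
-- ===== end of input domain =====

-- ===== PORT A =====
-- B precomputes the kept offsets and the row count in closed form; one flat comprehension
-- replaces A's per-row filteredOut construction (objective: simpler).
-- Loop of A, transliterated; the '1 ≤ nMax' conjunct is only a totality guard:
-- when nMax ≤ 0 and the loop condition holds, Python A loops forever (excluded by Pre_).
def extendLoopA (U nMax : Int) (basic_basis wheel_prime_numbers : List Int)
    (i : Int) (basis : List Int) : List Int :=
  if h : i * nMax + 1 ≤ U ∧ 1 ≤ nMax then
    -- nextLine = range(i*nMax+1, i*nMax+nMax+1)
    let nextLine := PySem.List.pyRange (i * nMax + 1) (i * nMax + nMax + 1) 1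
    -- first loop: for j in range(1, len(nextLine)+1): if j in wheel: append(i*nMax+j)
    let f1 := (PySem.List.pyRange 1 ((nextLine.length : Int) + 1) 1).foldl
      (fun acc j => if wheel_prime_numbers.contains j then acc ++ [i * nMax + j] else acc) []
    -- second loop: for j in range(2, len(nextLine)+1): if j not in basic_basis and (i*nMax+j) not in filteredOut: append
    let f2 := (PySem.List.pyRange 2 ((nextLine.length : Int) + 1) 1).foldl
      (fun acc j => if !basic_basis.contains j && !acc.contains (i * nMax + j)
                    then acc ++ [i * nMax + j] else acc) f1
    -- nextLine = [x for x in nextLine if x not in filteredOut]; basis = basis + nextLine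
    extendLoopA U nMax basic_basis wheel_prime_numbers (i + 1)
      (basis ++ nextLine.filter (fun x => !f2.contains x))
  else basis
termination_by (U + 1 - i * nMax).toNat
decreasing_by
  have hm : (i + 1) * nMax = i * nMax + nMax := by ring
  omega

def extend_basis (UpperBoundNumber : Int) (nMax : Int) (basis : List Int) (basic_basis : List Int) (wheel_prime_numbers : List Int) : List Int :=
  extendLoopA UpperBoundNumber nMax basic_basis wheel_prime_numbers 1 basis

-- ===== PORT B =====
def extend_basis_alt (UpperBoundNumber : Int) (nMax : Int) (basis : List Int) (basic_basis : List Int) (wheel_prime_numbers : List Int) : List Int :=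
  let rows := if 1 ≤ nMax then PySem.Int.floordiv (UpperBoundNumber - 1) nMax else 0
  if rows ≤ 0 then basis
  else
    let kept := (PySem.List.pyRange 1 (nMax + 1) 1).filter
      (fun j => !wheel_prime_numbers.contains j && (j == 1 || basic_basis.contains j))
    basis ++ (PySem.List.pyRange 1 (rows + 1) 1).flatMap
      (fun i => kept.map (fun j => i * nMax + j))

-- ===== PRECONDITION & SPEC =====
-- Pre_ excludes exactly the inputs on which Python A loops forever (nMax ≤ 0 with the
-- loop condition initially true); A returns on every input satisfying Pre_.
def Pre_extend_basis (UpperBoundNumber : Int) (nMax : Int) (basis : List Int) (basic_basis : List Int) (wheel_prime_numbers : List Int) : Prop :=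
  1 ≤ nMax ∨ UpperBoundNumber < nMax + 1
instance (UpperBoundNumber : Int) (nMax : Int) (basis : List Int) (basic_basis : List Int) (wheel_prime_numbers : List Int) : Decidable (Pre_extend_basis UpperBoundNumber nMax basis basic_basis wheel_prime_numbers) := by unfold Pre_extend_basis; infer_instance
def pvWitness_extend_basis : Int × Int × List Int × List Int × List Int := (15, 6, [2, 3, 5], [1, 5], [2, 3, 4, 6])
def Spec_extend_basis (UpperBoundNumber : Int) (nMax : Int) (basis : List Int) (basic_basis : List Int) (wheel_prime_numbers : List Int) (out : List Int) : Prop := out = extend_basis_alt UpperBoundNumber nMax basis basic_basis wheel_prime_numbers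
instance (UpperBoundNumber : Int) (nMax : Int) (basis : List Int) (basic_basis : List Int) (wheel_prime_numbers : List Int) (out : List Int) : Decidable (Spec_extend_basis UpperBoundNumber nMax basis basic_basis wheel_prime_numbers out) := by unfold Spec_extend_basis; infer_instance

-- ===== CLAIM (what is proved, stated in full; the proofs are below) =====
def Claim_equal_extend_basis : Prop := ∀ (UpperBoundNumber : Int) (nMax : Int) (basis : List Int) (basic_basis : List Int) (wheel_prime_numbers : List Int), Dom_extend_basis UpperBoundNumber nMax basis basic_basis wheel_prime_numbers → Pre_extend_basis UpperBoundNumber nMax basis basic_basis wheel_prime_numbers → Spec_extend_basis UpperBoundNumber nMax basis basic_basis wheel_prime_numbers (extend_basis UpperBoundNumber nMax basis basic_basis wheel_prime_numbers)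

-- ===== LEMMAS AND PROOFS =====

-- shifted range: range(m+a, m+b) = [m + j for j in range(a, b)]
theorem pyRange_shift (m a b : Int) :
    PySem.List.pyRange (m + a) (m + b) 1 = (PySem.List.pyRange a b 1).map (fun j => m + j) := by
  rw [PySem.List.pyRange_one, PySem.List.pyRange_one]
  have : m + b - (m + a) = b - a := by ring
  rw [this, List.map_map]
  exact List.map_congr_left (fun k _ => by simp; ring)

-- first inner loop of A builds the wheel hits of the row
theorem f1_eq (wheel : List Int) (m b : Int) :
    (PySem.List.pyRange 1 b 1).foldl
      (fun acc j => if wheel.contains j then acc ++ [m + j] else acc) []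
    = ((PySem.List.pyRange 1 b 1).filter (fun j => wheel.contains j)).map (fun j => m + j) := by
  simpa using PySem.List.foldl_append_if (fun j => wheel.contains j) (fun j => m + j)
    (PySem.List.pyRange 1 b 1) []

-- characterisation of membership in A's filteredOut prefix
theorem mem_acc_iff (bb wheel : List Int) (m b a x : Int) (h1 : 1 ≤ x) (h2 : x < b) (h3 : x ∉ PySem.List.pyRange 2 a 1) :
    (((PySem.List.pyRange 1 b 1).filter (fun j => wheel.contains j)).map (fun j => m + j)
      ++ ((PySem.List.pyRange 2 a 1).filter
            (fun j => !bb.contains j && !wheel.contains j)).map (fun j => m + j)).contains (m + x)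
    = wheel.contains x := by
  have key : (m + x) ∈ (((PySem.List.pyRange 1 b 1).filter (fun j => wheel.contains j)).map (fun j => m + j)
      ++ ((PySem.List.pyRange 2 a 1).filter
            (fun j => !bb.contains j && !wheel.contains j)).map (fun j => m + j)) ↔ x ∈ wheel := by
    rw [PySem.List.mem_pyRange_one] at h3
    simp only [List.mem_append, List.mem_map, List.mem_filter, PySem.List.mem_pyRange_one]
    constructor
    · rintro (⟨j, ⟨⟨hj1, hjb⟩, hjw⟩, heq⟩ | ⟨j, ⟨⟨hj2, hja⟩, hjq⟩, heq⟩)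
      · have hjx : j = x := by omega
        subst hjx; simpa using hjw
      · have hjx : j = x := by omega
        omega
    · intro hxw
      exact Or.inl ⟨x, ⟨by omega, by simpa using hxw⟩, rfl⟩
  calc _ = decide ((m + x) ∈ _) := by simp
    _ = decide (x ∈ wheel) := decide_eq_decide.mpr key
    _ = wheel.contains x := by simp

-- invariant of A's second inner loop
theorem loop2_inv (bb wheel : List Int) (m b a : Int) (h2 : 2 ≤ a) (hab : a ≤ b) :
    (PySem.List.pyRange a b 1).foldl
      (fun acc j => if !bb.contains j && !acc.contains (m + j) then acc ++ [m + j] else acc)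
      (((PySem.List.pyRange 1 b 1).filter (fun j => wheel.contains j)).map (fun j => m + j)
        ++ ((PySem.List.pyRange 2 a 1).filter
              (fun j => !bb.contains j && !wheel.contains j)).map (fun j => m + j))
    = ((PySem.List.pyRange 1 b 1).filter (fun j => wheel.contains j)).map (fun j => m + j)
        ++ ((PySem.List.pyRange 2 b 1).filter
              (fun j => !bb.contains j && !wheel.contains j)).map (fun j => m + j) := by
  by_cases hlt : a < b
  case neg =>
    have hab' : a = b := by omega
    subst hab'
    rw [PySem.List.pyRange_one_eq_nil (le_refl a)]
    rfl
  case pos =>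
    rw [PySem.List.pyRange_one_cons hlt, List.foldl_cons]
    have hacc := mem_acc_iff bb wheel m b a a (by omega) hlt
      (by rw [PySem.List.mem_pyRange_one]; omega)
    have hstep :
        (if !bb.contains a && !(((PySem.List.pyRange 1 b 1).filter (fun j => wheel.contains j)).map (fun j => m + j)
              ++ ((PySem.List.pyRange 2 a 1).filter
                    (fun j => !bb.contains j && !wheel.contains j)).map (fun j => m + j)).contains (m + a)
         then (((PySem.List.pyRange 1 b 1).filter (fun j => wheel.contains j)).map (fun j => m + j)
              ++ ((PySem.List.pyRange 2 a 1).filter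
                    (fun j => !bb.contains j && !wheel.contains j)).map (fun j => m + j)) ++ [m + a]
         else (((PySem.List.pyRange 1 b 1).filter (fun j => wheel.contains j)).map (fun j => m + j)
              ++ ((PySem.List.pyRange 2 a 1).filter
                    (fun j => !bb.contains j && !wheel.contains j)).map (fun j => m + j)))
        = ((PySem.List.pyRange 1 b 1).filter (fun j => wheel.contains j)).map (fun j => m + j)
              ++ ((PySem.List.pyRange 2 (a + 1) 1).filter
                    (fun j => !bb.contains j && !wheel.contains j)).map (fun j => m + j) := by
      rw [hacc, PySem.List.pyRange_one_succ_right h2, List.filter_append, List.map_append]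
      by_cases hbbm : a ∈ bb <;> by_cases hwwm : a ∈ wheel <;>
        simp [hbbm, hwwm, List.append_assoc]
    rw [hstep]
    exact loop2_inv bb wheel m b (a + 1) (by omega) (by omega)
termination_by (b - a).toNat
decreasing_by omega

-- membership in A's completed filteredOut list
theorem mem_full_iff (bb wheel : List Int) (m b x : Int) (h1 : 1 ≤ x) (h2 : x < b) :
    (((PySem.List.pyRange 1 b 1).filter (fun j => wheel.contains j)).map (fun j => m + j)
      ++ ((PySem.List.pyRange 2 b 1).filter
            (fun j => !bb.contains j && !wheel.contains j)).map (fun j => m + j)).contains (m + x)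
    = (wheel.contains x || (decide (2 ≤ x) && (!bb.contains x && !wheel.contains x))) := by
  have key : (m + x) ∈ (((PySem.List.pyRange 1 b 1).filter (fun j => wheel.contains j)).map (fun j => m + j)
      ++ ((PySem.List.pyRange 2 b 1).filter
            (fun j => !bb.contains j && !wheel.contains j)).map (fun j => m + j))
      ↔ (x ∈ wheel ∨ (2 ≤ x ∧ (x ∉ bb ∧ x ∉ wheel))) := by
    simp only [List.mem_append, List.mem_map, List.mem_filter, PySem.List.mem_pyRange_one]
    constructor
    · rintro (⟨j, ⟨⟨hj1, hjb⟩, hjw⟩, heq⟩ | ⟨j, ⟨⟨hj2, hjb⟩, hjq⟩, heq⟩)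
      · have hjx : j = x := by omega
        subst hjx; exact Or.inl (by simpa using hjw)
      · have hjx : j = x := by omega
        subst hjx
        refine Or.inr ⟨hj2, ?_⟩
        simpa using hjq
    · rintro (hxw | ⟨hx2, hq⟩)
      · exact Or.inl ⟨x, ⟨by omega, by simpa using hxw⟩, rfl⟩
      · exact Or.inr ⟨x, ⟨by omega, by simpa using hq⟩, rfl⟩
  calc _ = decide ((m + x) ∈ _) := by simp
    _ = decide (x ∈ wheel ∨ (2 ≤ x ∧ (x ∉ bb ∧ x ∉ wheel))) := decide_eq_decide.mpr key
    _ = _ := by by_cases hw : x ∈ wheel <;> by_cases hb : x ∈ bb <;> by_cases h2x : 2 ≤ x <;>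
          simp [hw, hb, h2x]

-- one row of A equals the shifted kept-offset list
theorem row_eq (bb wheel : List Int) (i nMax : Int) (hn : 1 ≤ nMax) :
    (PySem.List.pyRange (i * nMax + 1) (i * nMax + nMax + 1) 1).filter (fun x =>
      !((PySem.List.pyRange 2 (((PySem.List.pyRange (i * nMax + 1) (i * nMax + nMax + 1) 1).length : Int) + 1) 1).foldl
          (fun acc j => if !bb.contains j && !acc.contains (i * nMax + j) then acc ++ [i * nMax + j] else acc)
          ((PySem.List.pyRange 1 (((PySem.List.pyRange (i * nMax + 1) (i * nMax + nMax + 1) 1).length : Int) + 1) 1).foldl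
            (fun acc j => if wheel.contains j then acc ++ [i * nMax + j] else acc) [])).contains x)
    = ((PySem.List.pyRange 1 (nMax + 1) 1).filter
        (fun j => !wheel.contains j && (j == 1 || bb.contains j))).map (fun j => i * nMax + j) := by
  have hlen : ((PySem.List.pyRange (i * nMax + 1) (i * nMax + nMax + 1) 1).length : Int) + 1 = nMax + 1 := by
    rw [PySem.List.length_pyRange_one]; omega
  rw [hlen, f1_eq wheel (i * nMax) (nMax + 1)]
  have hf2 :
      (PySem.List.pyRange 2 (nMax + 1) 1).foldl
        (fun acc j => if !bb.contains j && !acc.contains (i * nMax + j) then acc ++ [i * nMax + j] else acc)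
        (((PySem.List.pyRange 1 (nMax + 1) 1).filter (fun j => wheel.contains j)).map (fun j => i * nMax + j))
      = ((PySem.List.pyRange 1 (nMax + 1) 1).filter (fun j => wheel.contains j)).map (fun j => i * nMax + j)
          ++ ((PySem.List.pyRange 2 (nMax + 1) 1).filter
                (fun j => !bb.contains j && !wheel.contains j)).map (fun j => i * nMax + j) := by
    have := loop2_inv bb wheel (i * nMax) (nMax + 1) 2 (le_refl 2) (by omega)
    rw [PySem.List.pyRange_one_eq_nil (le_refl 2)] at this
    simpa using this
  rw [hf2]
  have hshift : PySem.List.pyRange (i * nMax + 1) (i * nMax + nMax + 1) 1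
      = (PySem.List.pyRange 1 (nMax + 1) 1).map (fun j => i * nMax + j) := by
    have h1 : i * nMax + nMax + 1 = i * nMax + (nMax + 1) := by ring
    rw [h1]; exact pyRange_shift (i * nMax) 1 (nMax + 1)
  rw [hshift, List.filter_map]
  congr 1
  apply List.filter_congr
  intro x hx
  rw [PySem.List.mem_pyRange_one] at hx
  simp only [Function.comp]
  rw [mem_full_iff bb wheel (i * nMax) (nMax + 1) x (by omega) (by omega)]
  by_cases hx1 : x = 1
  · subst hx1
    by_cases h : (1:Int) ∈ wheel <;> simp [h]
  · have h2x : 2 ≤ x := by omega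
    by_cases hw : x ∈ wheel <;> by_cases hb : x ∈ bb <;>
      simp [hw, hb, hx1, h2x]

-- the whole of A's loop equals B's flat comprehension of the remaining rows
theorem loopA_eq (U nMax : Int) (bb wheel : List Int) (hn : 1 ≤ nMax) (i : Int) (basis : List Int) :
    extendLoopA U nMax bb wheel i basis
    = basis ++ (PySem.List.pyRange i (PySem.Int.floordiv (U - 1) nMax + 1) 1).flatMap
        (fun i' => (((PySem.List.pyRange 1 (nMax + 1) 1).filter
            (fun j => !wheel.contains j && (j == 1 || bb.contains j))).map (fun j => i' * nMax + j))) := by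
  rw [extendLoopA]
  by_cases hc : i * nMax + 1 ≤ U
  case neg =>
    rw [dif_neg (by tauto)]
    have : PySem.Int.floordiv (U - 1) nMax + 1 ≤ i := by
      have := (PySem.Int.floordiv_lt_iff_lt_mul (a := U - 1) (b := nMax) (q := i) (by omega)).2 (by nlinarith)
      omega
    rw [PySem.List.pyRange_one_eq_nil this]
    simp
  case pos =>
    rw [dif_pos ⟨hc, hn⟩]
    have hik : i ≤ PySem.Int.floordiv (U - 1) nMax := by
      rw [PySem.Int.le_floordiv_iff_mul_le (by omega)]; omega
    rw [loopA_eq U nMax bb wheel hn (i + 1), row_eq bb wheel i nMax hn,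
      PySem.List.pyRange_one_cons (by omega : i < PySem.Int.floordiv (U - 1) nMax + 1)]
    simp [List.append_assoc]
termination_by (U + 1 - i * nMax).toNat
decreasing_by
  have hm : (i + 1) * nMax = i * nMax + nMax := by ring
  omega

-- ===== VERDICT (by name: the statement is the Claim_ definition above) =====
theorem extend_basis_spec : Claim_equal_extend_basis := by
  intro U nMax basis bb wheel _ hpre
  unfold Spec_extend_basis extend_basis extend_basis_alt
  by_cases hn : 1 ≤ nMax
  · rw [loopA_eq U nMax bb wheel hn 1 basis, if_pos hn]
    by_cases hk : PySem.Int.floordiv (U - 1) nMax ≤ 0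
    · rw [if_pos hk, PySem.List.pyRange_one_eq_nil (show PySem.Int.floordiv (U - 1) nMax + 1 ≤ 1 by omega)]
      simp
    · rw [if_neg hk]
  · have hU : U < nMax + 1 := hpre.resolve_left hn
    rw [extendLoopA, dif_neg (by intro h; omega), if_neg hn, if_pos (le_refl (0:Int))]
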